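-- pv_equiv track=rewrite | github.com/GamesNotDeveloped/a800mon | a800mon/history.py | _find_hex_addr_span
-- ===== SOURCE A (Python) =====
-- def _find_hex_addr_span(text: str):
--     start = text.find("$")
--     if start < 0:
--         return None
--     end = start + 1
--     while end < len(text):
--         ch = text[end]
--         if ("0" <= ch <= "9") or ("A" <= ch <= "F") or ("a" <= ch <= "f"):
--             end += 1
--             continue
--         break
--     if end == start + 1:
--         return None
--     return start, end
-- ===== SOURCE B (Python) =====
-- import re
--
-- _ADDR = re.compile(r'[^$]*(\$[0-9A-Fa-f]+)')
--
-- def _find_hex_addr_span(text: str):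
--     m = _ADDR.match(text)
--     if m is None:
--         return None
--     return m.start(1), m.end(1)
-- ===== Notes on version B (the rewrite author's own statement) =====
-- stated objective: idiomatic
-- what changed: Replaces the find-then-index-based hex-consuming while loop with a single precompiled anchored regex match of r'[^$]*(\$[0-9A-Fa-f]+)' whose group-1 span is the answer.
import Mathlib
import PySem

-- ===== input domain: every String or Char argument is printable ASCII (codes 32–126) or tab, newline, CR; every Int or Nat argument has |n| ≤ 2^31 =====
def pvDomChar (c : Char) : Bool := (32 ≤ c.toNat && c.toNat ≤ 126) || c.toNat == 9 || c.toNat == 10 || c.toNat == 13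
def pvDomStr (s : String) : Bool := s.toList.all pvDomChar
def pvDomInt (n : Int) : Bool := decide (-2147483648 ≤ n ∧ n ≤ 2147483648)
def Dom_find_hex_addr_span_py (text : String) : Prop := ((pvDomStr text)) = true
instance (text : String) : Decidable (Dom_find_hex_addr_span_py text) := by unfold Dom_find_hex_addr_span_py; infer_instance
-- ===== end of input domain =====

-- B replaces A's find-then-index-while-loop scan with a single anchored regex match of
-- r'[^$]*(\$[0-9A-Fa-f]+)' and reads group 1's span (idiomatic; same cost).

-- ===== PORT A =====
-- the hex test A's loop branch performs, kept as the same three range comparisons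
def pvIsHexA (ch : Char) : Bool :=
  ('0' ≤ ch && ch ≤ '9') || ('A' ≤ ch && ch ≤ 'F') || ('a' ≤ ch && ch ≤ 'f')

-- A's `while end < len(text)` loop advancing `end` over hex digits
def pvALoop (cs : List Char) (e : Nat) : Nat :=
  if h : e < cs.length then
    if pvIsHexA cs[e] then pvALoop cs (e + 1) else e
  else e
termination_by cs.length - e

def find_hex_addr_span_py (text : String) : Option (Int × Int) :=
  let start := PySem.Str.find text "$"
  if start < 0 then none
  else
    let e := pvALoop text.toList (start.toNat + 1)
    if (e : Int) = start + 1 then none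
    else some (start, (e : Int))

-- ===== PORT B =====
-- the regex character class [0-9A-Fa-f]
def pvIsHexB (c : Char) : Bool :=
  c.isDigit || ('A' ≤ c && c ≤ 'F') || ('a' ≤ c && c ≤ 'f')

-- hand port of `_ADDR.match(text)` for the regex [^$]*(\$[0-9A-Fa-f]+), exact on every string:
-- anchored at 0, [^$]* greedily consumes the maximal run of non-'$' characters (it can never
-- cross a '$', so no backtracking is possible), then \$ must see a '$', then [0-9A-Fa-f]+
-- greedily consumes a nonempty hex run; group 1's span is ($-position, end of the hex run).
def find_hex_addr_span_py_alt (text : String) : Option (Int × Int) :=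
  let cs := text.toList
  let pre := cs.takeWhile (fun c => !(c == '$'))
  match cs.drop pre.length with
  | [] => none                     -- no '$' anywhere: the \$ of the pattern fails
  | _ :: tail =>                   -- the dropped head is the first '$'
    let hex := tail.takeWhile pvIsHexB
    if hex.length = 0 then none    -- the + of the pattern fails; match is anchored, so fail
    else some ((pre.length : Int), (pre.length : Int) + 1 + (hex.length : Int))

-- ===== PRECONDITION & SPEC =====
def Spec_find_hex_addr_span_py (text : String) (out : Option (Int × Int)) : Prop := out = find_hex_addr_span_py_alt text
instance (text : String) (out : Option (Int × Int)) : Decidable (Spec_find_hex_addr_span_py text out) := by unfold Spec_find_hex_addr_span_py; infer_instance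

-- ===== CLAIM (what is proved, stated in full; the proofs are below) =====
def Claim_equal_find_hex_addr_span_py : Prop := ∀ (text : String), Dom_find_hex_addr_span_py text → Spec_find_hex_addr_span_py text (find_hex_addr_span_py text)

-- ===== LEMMAS AND PROOFS =====

-- the regex class and A's three range comparisons agree on every character
lemma pvIsHexB_eq (c : Char) : pvIsHexB c = pvIsHexA c := by
  simp [pvIsHexB, pvIsHexA, Char.isDigit, Char.le_def, UInt32.le_iff_toNat_le]

-- A's loop lands exactly past the maximal hex run starting at e
lemma pvALoop_eq (cs : List Char) (e : Nat) :
    pvALoop cs e = e + ((cs.drop e).takeWhile pvIsHexA).length := by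
  induction e using pvALoop.induct cs with
  | case1 e h hhex ih =>
      rw [pvALoop]
      simp only [h, hhex, if_pos, dite_eq_ite, ih]
      rw [List.drop_eq_getElem_cons h, List.takeWhile_cons, hhex]
      simp; omega
  | case2 e h hhex =>
      rw [pvALoop]
      simp only [h, dite_eq_ite, if_pos, hhex]
      rw [List.drop_eq_getElem_cons h, List.takeWhile_cons]
      simp [hhex]
  | case3 e h =>
      rw [pvALoop]
      simp only [h]
      rw [List.drop_eq_nil_iff.mpr (by omega)]
      simp

-- the maximal run of non-'$' characters ends exactly at the first '$'
lemma len_takeWhile_not_dollar (cs : List Char) (k : Nat) (hk : k < cs.length)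
    (h1 : cs[k] = '$') (h2 : ∀ i, (h : i < k) → cs[i]'(by omega) ≠ '$') :
    (cs.takeWhile (fun c => !(c == '$'))).length = k := by
  induction cs generalizing k with
  | nil => simp at hk
  | cons a t ih =>
      cases k with
      | zero =>
          simp at h1
          simp [h1]
      | succ k =>
          have ha : a ≠ '$' := by
            have := h2 0 (by omega)
            simpa using this
          simp only [List.takeWhile_cons]
          rw [if_pos (by simpa using ha)]
          simp only [List.length_cons]
          have := ih k (by simpa using hk) (by simpa using h1)
            (fun i hi => by have := h2 (i + 1) (by omega); simpa using this)
          omega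

lemma takeWhile_not_dollar_all (cs : List Char) (h : '$' ∉ cs) :
    cs.takeWhile (fun c => !(c == '$')) = cs := by
  apply List.takeWhile_eq_self_iff.mpr
  intro c hc
  simp
  rintro rfl
  exact h hc

-- ===== VERDICT (by name: the statement is the Claim_ definition above) =====
theorem find_hex_addr_span_py_spec : Claim_equal_find_hex_addr_span_py := by
  intro text _
  unfold Spec_find_hex_addr_span_py
  simp only [find_hex_addr_span_py, find_hex_addr_span_py_alt]
  have hdollar : ("$" : String).toList = ['$'] := by decide
  rw [PySem.Str.find_eq]
  by_cases hmem : ('$' : Char) ∈ text.toList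
  · -- '$' occurs: find ≥ 0 and points at the first occurrence
    have hinfix : ("$" : String).toList <:+: text.toList := by
      rw [hdollar]; exact (List.singleton_infix_iff _ _).mpr hmem
    have hfind0 : (0 : Int) ≤ PySem.Chars.find text.toList ("$" : String).toList :=
      (PySem.Chars.find_nonneg_iff _ _).mpr hinfix
    obtain ⟨hpre, hmin⟩ := PySem.Chars.find_spec (s := text.toList)
      (sub := ("$" : String).toList) hfind0
    generalize hFk : PySem.Chars.find text.toList ("$" : String).toList = F at *
    obtain ⟨k, rfl⟩ : ∃ k : Nat, F = (k : Int) := ⟨F.toNat, by omega⟩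
    rw [Int.toNat_natCast] at hpre hmin
    rw [hdollar] at hpre hmin
    obtain ⟨t, ht⟩ : ∃ t, text.toList.drop k = '$' :: t := by
      obtain ⟨t, ht⟩ := hpre
      exact ⟨t, by simpa using ht.symm⟩
    have hklt : k < text.toList.length := by
      by_contra h
      rw [List.drop_eq_nil_iff.mpr (by omega)] at ht
      simp at ht
    have hcons := List.drop_eq_getElem_cons hklt
    have hgetk : text.toList[k] = '$' := by
      rw [ht] at hcons
      exact ((List.cons.injEq ..).mp hcons.symm).1
    have htail : t = text.toList.drop (k + 1) := by
      rw [ht] at hcons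
      exact ((List.cons.injEq ..).mp hcons.symm).2.symm
    have hbefore : ∀ i, (h : i < k) → text.toList[i]'(by omega) ≠ '$' := by
      intro i hi hval
      apply hmin i hi
      rw [List.drop_eq_getElem_cons (by omega : i < text.toList.length), hval]
      exact ⟨_, rfl⟩
    have hlen : (text.toList.takeWhile (fun c => !(c == '$'))).length = k :=
      len_takeWhile_not_dollar _ k hklt hgetk hbefore
    have hBpred : (text.toList.drop (k + 1)).takeWhile pvIsHexB
        = (text.toList.drop (k + 1)).takeWhile pvIsHexA := by
      rw [funext pvIsHexB_eq]
    have hnneg : ¬ ((k : Int) < 0) := by omega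
    simp only [hnneg, if_false, hlen, ht, htail, hBpred, Int.toNat_natCast]
    rw [pvALoop_eq]
    by_cases hz : ((text.toList.drop (k + 1)).takeWhile pvIsHexA).length = 0
    · simp [hz]
    · have h1 : ((k + 1 + ((text.toList.drop (k + 1)).takeWhile pvIsHexA).length : Nat) : Int)
          ≠ (k : Int) + 1 := by omega
      simp only [hz, if_false, h1, if_false, Option.some.injEq, Prod.mk.injEq]
      refine ⟨trivial, ?_⟩
      push_cast
      ring
  · -- no '$': A's find is -1, B's takeWhile covers the whole string so the drop is empty
    have hfind : PySem.Chars.find text.toList ("$" : String).toList = -1 := by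
      apply (PySem.Chars.find_eq_neg_one_iff _ _).mpr
      rw [hdollar]
      exact fun hinf => hmem ((List.singleton_infix_iff _ _).mp hinf)
    have hnil : text.toList.drop text.length = [] := by
      simp
    rw [hdollar] at hfind
    rw [takeWhile_not_dollar_all text.toList hmem]
    simp [hfind, hnil]
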